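-- pv_equiv track=rewrite | github.com/ibucic/multimedijske-arhitekture-i-sustavi | 1. labos/ivan_bucic_dz1.py | create_YCbCr_matrix
-- ===== SOURCE A (Python) =====
-- def create_YCbCr_matrix(block):
--     YCbCr_matrix = [[] for _ in range(3)]
--     for row_in_block in block:
--         YCbCr_row = [[] for _ in range(3)]
--         for pixel in row_in_block:
--             for i in range(3):
--                 YCbCr_row[i].append(pixel[i])
--         for i in range(3):
--             YCbCr_matrix[i].append(YCbCr_row[i])
--
--     return YCbCr_matrix
-- ===== SOURCE B (Python) =====
-- def create_YCbCr_matrix(block):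
--     return [[[pixel[i] for pixel in row] for row in block] for i in range(3)]
-- ===== Notes on version B (the rewrite author's own statement) =====
-- stated objective: idiomatic
-- what changed: Channel-major decomposition: three independent channel passes over the block (channel index outermost) instead of A's single pixel-major pass that appends to all three channels at once.
import Mathlib
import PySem

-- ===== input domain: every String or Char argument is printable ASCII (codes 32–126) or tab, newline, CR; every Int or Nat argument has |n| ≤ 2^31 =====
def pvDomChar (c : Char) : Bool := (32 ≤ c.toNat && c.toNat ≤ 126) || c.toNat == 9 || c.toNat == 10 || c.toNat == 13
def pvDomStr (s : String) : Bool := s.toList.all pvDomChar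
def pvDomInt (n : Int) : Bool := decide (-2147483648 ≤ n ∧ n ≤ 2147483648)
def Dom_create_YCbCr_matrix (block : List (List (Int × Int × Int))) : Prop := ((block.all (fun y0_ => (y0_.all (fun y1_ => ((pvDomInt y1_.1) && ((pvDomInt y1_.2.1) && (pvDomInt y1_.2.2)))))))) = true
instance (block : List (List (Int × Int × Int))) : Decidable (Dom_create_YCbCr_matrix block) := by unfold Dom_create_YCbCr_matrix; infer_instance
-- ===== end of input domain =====

-- B is the idiomatic channel-major decomposition (three independent passes, channel index
-- outermost) instead of A's single pixel-major pass appending to all three channels at once.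

-- ===== PORT A =====
-- literal port of A: one pass over the block; per row one pass over its pixels appending
-- each pixel's three components to three accumulators at once
def create_YCbCr_matrix (block : List (List (Int × Int × Int))) : List (List (List Int)) :=
  let m := block.foldl
    (fun (m : List (List Int) × List (List Int) × List (List Int)) row =>
      let r := row.foldl
        (fun (r : List Int × List Int × List Int) px =>
          (r.1 ++ [px.1], r.2.1 ++ [px.2.1], r.2.2 ++ [px.2.2]))
        ([], [], [])
      (m.1 ++ [r.1], m.2.1 ++ [r.2.1], m.2.2 ++ [r.2.2]))
    ([], [], [])
  [m.1, m.2.1, m.2.2]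

-- ===== PORT B =====
-- port of B: one independent map over the block per channel
def create_YCbCr_matrix_alt (block : List (List (Int × Int × Int))) : List (List (List Int)) :=
  [block.map (fun row => row.map (fun px => px.1)),
   block.map (fun row => row.map (fun px => px.2.1)),
   block.map (fun row => row.map (fun px => px.2.2))]

-- ===== PRECONDITION & SPEC =====
def Spec_create_YCbCr_matrix (block : List (List (Int × Int × Int))) (out : List (List (List Int))) : Prop := out = create_YCbCr_matrix_alt block
instance (block : List (List (Int × Int × Int))) (out : List (List (List Int))) : Decidable (Spec_create_YCbCr_matrix block out) := by unfold Spec_create_YCbCr_matrix; infer_instance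

-- ===== CLAIM (what is proved, stated in full; the proofs are below) =====
def Claim_equal_create_YCbCr_matrix : Prop := ∀ (block : List (List (Int × Int × Int))), Dom_create_YCbCr_matrix block → Spec_create_YCbCr_matrix block (create_YCbCr_matrix block)

-- ===== LEMMAS AND PROOFS =====

theorem inner_foldl (row : List (Int × Int × Int)) (a b c : List Int) :
    row.foldl
      (fun (r : List Int × List Int × List Int) px =>
        (r.1 ++ [px.1], r.2.1 ++ [px.2.1], r.2.2 ++ [px.2.2])) (a, b, c)
    = (a ++ row.map (fun px => px.1),
       b ++ row.map (fun px => px.2.1),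
       c ++ row.map (fun px => px.2.2)) := by
  induction row generalizing a b c with
  | nil => simp
  | cons px rest ih => simp [List.foldl, ih]

theorem outer_foldl (block : List (List (Int × Int × Int)))
    (a b c : List (List Int)) :
    block.foldl
      (fun (m : List (List Int) × List (List Int) × List (List Int)) row =>
        let r := row.foldl
          (fun (r : List Int × List Int × List Int) px =>
            (r.1 ++ [px.1], r.2.1 ++ [px.2.1], r.2.2 ++ [px.2.2]))
          ([], [], [])
        (m.1 ++ [r.1], m.2.1 ++ [r.2.1], m.2.2 ++ [r.2.2])) (a, b, c)
    = (a ++ block.map (fun row => row.map (fun px => px.1)),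
       b ++ block.map (fun row => row.map (fun px => px.2.1)),
       c ++ block.map (fun row => row.map (fun px => px.2.2))) := by
  induction block generalizing a b c with
  | nil => simp
  | cons row rest ih =>
      simp only [List.foldl_cons]
      rw [ih]
      simp [inner_foldl]

-- ===== VERDICT (by name: the statement is the Claim_ definition above) =====
theorem create_YCbCr_matrix_spec : Claim_equal_create_YCbCr_matrix := by
  intro block _
  unfold Spec_create_YCbCr_matrix create_YCbCr_matrix create_YCbCr_matrix_alt
  simp [outer_foldl]
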